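-- pv_equiv track=rewrite | github.com/angkul07/kodo-cli | context_manager.py | _identify_key_files
-- ===== SOURCE A (Python) =====
-- from typing import Dict, List, Optional, Any
--
-- def _identify_key_files(snapshot: Dict) -> str:
--     """Identify and list key project files"""
--     files = snapshot.get('files', {})
--     key_files = []
--
--     # Look for common entry points and important files
--     important_patterns = [
--         'main.py', 'app.py', 'index.js', 'index.ts', 'server.py',
--         'manage.py', 'setup.py', 'requirements.txt', 'package.json',
--         'README.md', 'Dockerfile', 'Makefile'
--     ]
--
--     for pattern in important_patterns:
--         for file_path in files.keys():
--             if pattern.lower() in file_path.lower():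
--                 key_files.append(f"- {file_path}")
--                 break
--
--     return '\n'.join(key_files) if key_files else "- Standard project structure"
-- ===== SOURCE B (Python) =====
-- def _identify_key_files(snapshot):
--     """Identify and list key project files.
--
--     Instead of testing every pattern against every file with substring
--     containment (A's nested `pattern in file` scans), do multi-pattern
--     dictionary matching: per file, slide a window over its lowercased path
--     and look each window of a pattern length up in a hash set of lowercased
--     patterns, yielding the set of patterns present in that file; then each
--     pattern just needs a set-membership probe per file.
--     """
--     files = snapshot.get('files', {})
--
--     important_patterns = [
--         'main.py', 'app.py', 'index.js', 'index.ts', 'server.py',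
--         'manage.py', 'setup.py', 'requirements.txt', 'package.json',
--         'README.md', 'Dockerfile', 'Makefile'
--     ]
--
--     pattern_set = {p.lower() for p in important_patterns}
--     lengths = sorted({len(p) for p in important_patterns})
--
--     per_file = [(fp, _present_patterns(fp.lower(), lengths, pattern_set))
--                 for fp in files.keys()]
--
--     key_files = []
--     for pattern in important_patterns:
--         pl = pattern.lower()
--         for file_path, present in per_file:
--             if pl in present:
--                 key_files.append(f"- {file_path}")
--                 break
--
--     return '\n'.join(key_files) if key_files else "- Standard project structure"
--
--
-- def _present_patterns(low, lengths, pattern_set):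
--     """Set of lowercased patterns occurring as substrings of low, by sliding windows."""
--     found = set()
--     for i in range(len(low)):
--         for L in lengths:
--             w = low[i:i + L]
--             if w in pattern_set:
--                 found.add(w)
--     return found
-- ===== Notes on version B (the rewrite author's own statement) =====
-- stated objective: alternative
-- what changed: Replaced A's per-pattern substring scans ('pattern in file' for every pattern x file) by multi-pattern dictionary matching: per file one sliding-window scan of the lowercased path looks windows of the pattern lengths up in a hash set of lowercased patterns, yielding the set of patterns present, so each pattern then needs only a set-membership probe per file.
import Mathlib
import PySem

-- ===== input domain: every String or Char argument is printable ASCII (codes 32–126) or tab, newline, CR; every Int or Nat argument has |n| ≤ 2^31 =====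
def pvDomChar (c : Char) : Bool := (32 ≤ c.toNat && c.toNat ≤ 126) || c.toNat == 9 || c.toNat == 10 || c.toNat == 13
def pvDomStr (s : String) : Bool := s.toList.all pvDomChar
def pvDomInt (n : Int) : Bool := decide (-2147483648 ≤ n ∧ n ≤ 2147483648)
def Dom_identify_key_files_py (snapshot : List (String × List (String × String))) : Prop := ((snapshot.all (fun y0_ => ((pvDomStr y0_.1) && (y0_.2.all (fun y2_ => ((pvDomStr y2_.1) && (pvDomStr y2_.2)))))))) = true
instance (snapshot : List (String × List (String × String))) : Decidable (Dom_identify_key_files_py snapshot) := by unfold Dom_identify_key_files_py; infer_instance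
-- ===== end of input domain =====

-- B replaces A's per-pattern substring scans (`pattern in file` for every pattern × file)
-- by multi-pattern dictionary matching: per file one sliding-window scan over the
-- lowercased path, looking windows of the pattern lengths up in a hash set of lowercased
-- patterns, then a set-membership probe per pattern (alternative algorithm, same result).

-- ===== PORT A =====
-- the literal list of important patterns from the source
def pvPatterns : List String :=
  ["main.py", "app.py", "index.js", "index.ts", "server.py",
   "manage.py", "setup.py", "requirements.txt", "package.json",
   "README.md", "Dockerfile", "Makefile"]

def identify_key_files_py (snapshot : List (String × List (String × String))) : String :=
  let files := (PySem.Dict.ofList snapshot).getD "files" []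
  let fileKeys := (PySem.Dict.ofList files).keys
  -- for pattern in important_patterns: for file_path in files.keys(): if …: append; break
  let key_files := pvPatterns.foldl (fun acc pattern =>
      match fileKeys.find? (fun fp => PySem.Str.isIn (PySem.Str.lower pattern) (PySem.Str.lower fp)) with
      | some fp => acc ++ ["- " ++ fp]
      | none => acc) []
  if key_files.isEmpty then "- Standard project structure" else PySem.Str.join "\n" key_files

-- ===== PORT B =====
-- {p.lower() for p in important_patterns}
def pvPatternSet : PySem.Set String := PySem.Set.ofList (pvPatterns.map (fun p => PySem.Str.lower p))
-- sorted({len(p) for p in important_patterns})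
def pvLengths : List Int :=
  PySem.List.sorted (PySem.Set.ofList (pvPatterns.map (fun p => PySem.Str.len p))) (fun x => x) false

-- _present_patterns(low, lengths, pattern_set): sliding-window scan
def pvPresentPatterns (low : String) (lengths : List Int) (patternSet : PySem.Set String) : PySem.Set String :=
  (PySem.List.pyRange 0 (PySem.Str.len low) 1).foldl (fun found i =>
    lengths.foldl (fun found L =>
      let w := PySem.Str.slice low (some i) (some (i + L))
      if PySem.Set.contains patternSet w then PySem.Set.add found w else found) found)
    PySem.Set.empty

def identify_key_files_py_alt (snapshot : List (String × List (String × String))) : String :=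
  let files := (PySem.Dict.ofList snapshot).getD "files" []
  -- per_file = [(fp, _present_patterns(fp.lower(), lengths, pattern_set)) for fp in files.keys()]
  let per_file := ((PySem.Dict.ofList files).keys).map (fun fp =>
      (fp, pvPresentPatterns (PySem.Str.lower fp) pvLengths pvPatternSet))
  -- for pattern in …: for (file_path, present) in per_file: if pl in present: append; break
  let key_files := pvPatterns.foldl (fun acc pattern =>
      match per_file.find? (fun pr => PySem.Set.contains pr.2 (PySem.Str.lower pattern)) with
      | some pr => acc ++ ["- " ++ pr.1]
      | none => acc) []
  if key_files.isEmpty then "- Standard project structure" else PySem.Str.join "\n" key_files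

-- ===== PRECONDITION & SPEC =====
def Spec_identify_key_files_py (snapshot : List (String × List (String × String))) (out : String) : Prop := out = identify_key_files_py_alt snapshot
instance (snapshot : List (String × List (String × String))) (out : String) : Decidable (Spec_identify_key_files_py snapshot out) := by unfold Spec_identify_key_files_py; infer_instance

-- ===== CLAIM (what is proved, stated in full; the proofs are below) =====
def Claim_equal_identify_key_files_py : Prop := ∀ (snapshot : List (String × List (String × String))), Dom_identify_key_files_py snapshot → Spec_identify_key_files_py snapshot (identify_key_files_py snapshot)

-- ===== LEMMAS AND PROOFS =====

-- membership after the inner fold over the window lengths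
theorem pv_mem_scan1 (c : String → Bool) (g : Int → String) (Ls : List Int)
    (s0 : PySem.Set String) (w : String) :
    (w ∈ Ls.foldl (fun s L => if c (g L) then PySem.Set.add s (g L) else s) s0)
    ↔ w ∈ s0 ∨ ∃ L ∈ Ls, c (g L) = true ∧ g L = w := by
  induction Ls generalizing s0 with
  | nil => simp
  | cons L rest ih =>
    simp only [List.foldl_cons]
    rw [ih]
    by_cases hc : c (g L) = true
    · simp only [hc, if_true, PySem.Set.mem_add, List.exists_mem_cons_iff, true_and, eq_comm]
      tauto
    · simp [hc]

-- membership after the full window scan (outer fold over start positions)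
theorem pv_mem_scan (c : String → Bool) (g : Int → Int → String) (is Ls : List Int)
    (s0 : PySem.Set String) (w : String) :
    (w ∈ is.foldl (fun s i => Ls.foldl (fun s L =>
        if c (g i L) then PySem.Set.add s (g i L) else s) s) s0)
    ↔ w ∈ s0 ∨ ∃ i ∈ is, ∃ L ∈ Ls, c (g i L) = true ∧ g i L = w := by
  induction is generalizing s0 with
  | nil => simp
  | cons i rest ih =>
    simp only [List.foldl_cons]
    rw [ih, pv_mem_scan1]
    simp only [List.exists_mem_cons_iff]
    rw [or_assoc]

-- literal facts about the 12 patterns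
theorem pv_pattern_facts : ∀ p ∈ pvPatterns,
    PySem.Set.contains pvPatternSet (PySem.Str.lower p) = true ∧
    (((PySem.Str.lower p).toList.length : Int) ∈ pvLengths) ∧
    (PySem.Str.lower p).toList ≠ [] := by decide

theorem pv_lengths_pos : ∀ L ∈ pvLengths, 0 < L := by decide

-- a window with both bounds admissible is an infix
theorem pv_slice_infix (t : List Char) (i L : Int) (hi : 0 ≤ i) (hL : 0 ≤ L) :
    PySem.List.slice t (some i) (some (i + L)) <:+: t := by
  rw [PySem.List.slice_toNat t hi (by omega)]
  exact ((List.take_prefix _ _).isInfix.trans (List.drop_suffix _ _).isInfix)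

-- the window scan finds q iff q is a substring (q nonempty, |q| among the lengths)
theorem pv_window_iff (t q : List Char) (Ls : List Int)
    (hq : q ≠ []) (hlen : ((q.length : Int) ∈ Ls)) (hpos : ∀ L ∈ Ls, 0 < L) :
    (∃ i ∈ PySem.List.pyRange 0 (t.length : Int) 1, ∃ L ∈ Ls,
        PySem.List.slice t (some i) (some (i + L)) = q)
    ↔ q <:+: t := by
  constructor
  · rintro ⟨i, hi, L, hL, heq⟩
    rw [PySem.List.mem_pyRange_one] at hi
    exact heq ▸ pv_slice_infix t i L hi.1 (le_of_lt (hpos L hL))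
  · rintro ⟨s, u, h⟩
    refine ⟨(s.length : Int), ?_, (q.length : Int), hlen, ?_⟩
    · rw [PySem.List.mem_pyRange_one]
      have ht : t.length = s.length + (q.length + u.length) := by rw [← h]; simp
      have hq1 : 0 < q.length := List.length_pos_iff.mpr hq
      refine ⟨by positivity, ?_⟩
      rw [ht]; push_cast; omega
    · rw [PySem.List.slice_natCast_add, ← h]
      rw [List.append_assoc, List.drop_left, List.take_left]

-- per file: the present-set contains p.lower() iff p.lower() occurs in the file path
theorem pv_contains_present (p fp : String) (hp : p ∈ pvPatterns) :
    PySem.Set.contains (pvPresentPatterns (PySem.Str.lower fp) pvLengths pvPatternSet) (PySem.Str.lower p)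
    = PySem.Str.isIn (PySem.Str.lower p) (PySem.Str.lower fp) := by
  obtain ⟨hc, hlen, hne⟩ := pv_pattern_facts p hp
  rw [Bool.eq_iff_iff, PySem.Set.contains_iff, PySem.Str.isIn_iff_infix]
  simp only [pvPresentPatterns]
  rw [pv_mem_scan]
  have hbridge : ∀ i L : Int,
      (PySem.Str.slice (PySem.Str.lower fp) (some i) (some (i + L)) = PySem.Str.lower p)
      ↔ PySem.List.slice (PySem.Str.lower fp).toList (some i) (some (i + L)) = (PySem.Str.lower p).toList := by
    intro i L
    rw [← String.toList_inj, PySem.Str.toList_slice, PySem.Chars.slice_eq_listSlice]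
  rw [← pv_window_iff (PySem.Str.lower fp).toList (PySem.Str.lower p).toList pvLengths hne hlen pv_lengths_pos]
  simp only [PySem.Set.empty, List.not_mem_nil, false_or, PySem.Str.len_eq, hbridge]
  constructor
  · rintro ⟨i, hi, L, hL, _, heq⟩; exact ⟨i, hi, L, hL, heq⟩
  · rintro ⟨i, hi, L, hL, heq⟩
    refine ⟨i, hi, L, hL, ?_, heq⟩
    have : PySem.Str.slice (PySem.Str.lower fp) (some i) (some (i + L)) = PySem.Str.lower p :=
      (hbridge i L).mpr heq
    rw [this]; exact hc

-- the two result-line lists coincide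
set_option maxHeartbeats 1000000 in
theorem pv_lists_eq (fileKeys : List String) :
    pvPatterns.foldl (fun acc pattern =>
      match (fileKeys.map (fun fp =>
          (fp, pvPresentPatterns (PySem.Str.lower fp) pvLengths pvPatternSet))).find?
            (fun pr => PySem.Set.contains pr.2 (PySem.Str.lower pattern)) with
      | some pr => acc ++ ["- " ++ pr.1]
      | none => acc) []
    = pvPatterns.foldl (fun acc pattern =>
      match fileKeys.find? (fun fp => PySem.Str.isIn (PySem.Str.lower pattern) (PySem.Str.lower fp)) with
      | some fp => acc ++ ["- " ++ fp]
      | none => acc) [] := by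
  apply PySem.List.foldl_congr_mem
  intro acc pattern hpat
  rw [List.find?_map]
  have hpred : ((fun pr : String × PySem.Set String =>
      PySem.Set.contains pr.2 (PySem.Str.lower pattern)) ∘
        (fun fp => (fp, pvPresentPatterns (PySem.Str.lower fp) pvLengths pvPatternSet)))
      = (fun fp => PySem.Str.isIn (PySem.Str.lower pattern) (PySem.Str.lower fp)) := by
    funext fp
    simp only [Function.comp_apply]
    exact pv_contains_present pattern fp hpat
  rw [hpred]
  cases hfind : fileKeys.find? (fun fp => PySem.Str.isIn (PySem.Str.lower pattern) (PySem.Str.lower fp)) with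
  | none => rfl
  | some fp => rfl

-- ===== VERDICT (by name: the statement is the Claim_ definition above) =====
theorem identify_key_files_py_spec : Claim_equal_identify_key_files_py := by
  intro snapshot _
  simp only [Spec_identify_key_files_py, identify_key_files_py, identify_key_files_py_alt]
  rw [pv_lists_eq]
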